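-- pv_equiv track=rewrite | github.com/acriptis/dj_bot | ruler_bot/components/dataset_iterators/dialog_iterator.py | _biomarkup2list
-- ===== SOURCE A (Python) =====
-- def _biomarkup2list(tokens, markup):
--     slots = []
--     _markup = markup + ['O']
--     i = 0
--     while i < len(_markup):
--         if _markup[i] != 'O':
--             slot = _markup[i][2:]
--             slot_exclusive_end = i + 1
--             while _markup[slot_exclusive_end] == ('I-' + slot):
--                 slot_exclusive_end += 1
--             slots.append((slot, ' '.join(tokens[i: slot_exclusive_end])))
--             i = slot_exclusive_end
--         else:
--             i += 1
--     return slots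
-- ===== SOURCE B (Python) =====
-- def _biomarkup2list(tokens, markup):
--     slots = []
--     cur = None  # (slot_name, start_index) of the currently open slot, or None
--     for i, tag in enumerate(markup):
--         if cur is not None and tag == 'I-' + cur[0]:
--             continue
--         if cur is not None:
--             slots.append((cur[0], ' '.join(tokens[cur[1]:i])))
--             cur = None
--         if tag != 'O':
--             cur = (tag[2:], i)
--     if cur is not None:
--         slots.append((cur[0], ' '.join(tokens[cur[1]:len(markup)])))
--     return slots
-- ===== Notes on version B (the rewrite author's own statement) =====
-- stated objective: simpler
-- what changed: Replaced A's sentinel-appending outer while with an index-jumping inner while scan by a single linear state-machine pass over enumerate(markup) that keeps the currently open slot (name, start index) as one state variable and flushes it when the run ends.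
import Mathlib
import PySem

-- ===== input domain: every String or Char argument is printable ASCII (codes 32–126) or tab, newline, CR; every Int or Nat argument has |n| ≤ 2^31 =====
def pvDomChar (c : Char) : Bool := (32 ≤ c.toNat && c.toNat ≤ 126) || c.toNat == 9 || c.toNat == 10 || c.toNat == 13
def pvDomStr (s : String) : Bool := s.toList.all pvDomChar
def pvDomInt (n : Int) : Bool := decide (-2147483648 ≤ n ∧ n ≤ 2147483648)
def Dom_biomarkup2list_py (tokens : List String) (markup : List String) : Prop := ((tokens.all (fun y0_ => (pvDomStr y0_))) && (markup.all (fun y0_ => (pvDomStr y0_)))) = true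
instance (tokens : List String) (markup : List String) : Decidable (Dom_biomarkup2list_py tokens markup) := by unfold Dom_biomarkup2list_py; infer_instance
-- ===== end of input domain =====

-- B replaces A's sentinel-and-inner-while scan by a single linear pass keeping the currently
-- open slot as one state variable (objective: simpler).

-- ' '.join(tokens[a:b]) — appears verbatim in both Pythons, shared helper
def pvJ (tokens : List String) (a b : Int) : String :=
  PySem.Str.join " " (PySem.List.slice tokens (some a) (some b))

-- ===== PORT A =====
-- inner while: slot_exclusive_end scanning while _markup[e] == 'I-' + slot
-- (string comparison done on code points: 'I-'+slot is 'I'::'-'::slot.toList — exact).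
-- fuel only bounds the loop for totality (fuel = len(_markup) always suffices: the 'O'
-- sentinel stops the scan); the pyGet? `none` branch is Python's IndexError, unreachable.
def pvScanEnd (m : List String) (cont : List Char) (fuel : Nat) (e : Nat) : Nat :=
  match fuel with
  | 0 => e
  | fuel + 1 =>
    match PySem.List.pyGet? m (e : Int) with
    | some tag => if tag.toList = cont then pvScanEnd m cont fuel (e + 1) else e
    | none => e

-- outer while over _markup = markup + ['O']; fuel only bounds the loop for totality
-- (i strictly increases each iteration, so fuel = len(_markup) + 1 always suffices)
def pvALoop (tokens : List String) (m : List String) (fuel : Nat) (i : Nat)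
    (slots : List (String × String)) : List (String × String) :=
  match fuel with
  | 0 => slots
  | fuel + 1 =>
    if _h : i < m.length then
      let tag := m[i]
      if tag.toList ≠ ['O'] then
        let slot := PySem.Str.slice tag (some 2) none
        let e := pvScanEnd m ('I' :: '-' :: slot.toList) m.length (i + 1)
        pvALoop tokens m fuel e (slots ++ [(slot, pvJ tokens (i : Int) (e : Int))])
      else
        pvALoop tokens m fuel (i + 1) slots
    else slots

def biomarkup2list_py (tokens : List String) (markup : List String) : List (String × String) :=
  pvALoop tokens (markup ++ ["O"]) ((markup ++ ["O"]).length + 1) 0 []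

-- ===== PORT B =====
-- one step of the for loop; state = (slots, cur) with cur = (slot name, start index) or none
def pvBStep (tokens : List String)
    (st : List (String × String) × Option (String × Int)) (p : Int × String) :
    List (String × String) × Option (String × Int) :=
  match st.2 with
  | some c =>
    if p.2.toList = 'I' :: '-' :: c.1.toList then st
    else
      let slots := st.1 ++ [(c.1, pvJ tokens c.2 p.1)]
      if p.2.toList ≠ ['O'] then (slots, some (PySem.Str.slice p.2 (some 2) none, p.1))
      else (slots, none)
  | none =>
    if p.2.toList ≠ ['O'] then (st.1, some (PySem.Str.slice p.2 (some 2) none, p.1))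
    else (st.1, none)

-- the final flush after the loop
def pvFlush (tokens : List String) (n : Int)
    (st : List (String × String) × Option (String × Int)) : List (String × String) :=
  match st.2 with
  | some c => st.1 ++ [(c.1, pvJ tokens c.2 n)]
  | none => st.1

def biomarkup2list_py_alt (tokens : List String) (markup : List String) : List (String × String) :=
  pvFlush tokens (markup.length : Int)
    (List.foldl (pvBStep tokens) ([], none) (PySem.List.enumerate markup 0))

-- ===== PRECONDITION & SPEC =====
def Spec_biomarkup2list_py (tokens : List String) (markup : List String) (out : List (String × String)) : Prop := out = biomarkup2list_py_alt tokens markup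
instance (tokens : List String) (markup : List String) (out : List (String × String)) : Decidable (Spec_biomarkup2list_py tokens markup out) := by unfold Spec_biomarkup2list_py; infer_instance

-- ===== CLAIM (what is proved, stated in full; the proofs are below) =====
def Claim_equal_biomarkup2list_py : Prop := ∀ (tokens : List String) (markup : List String), Dom_biomarkup2list_py tokens markup → Spec_biomarkup2list_py tokens markup (biomarkup2list_py tokens markup)

-- ===== LEMMAS AND PROOFS =====

-- B's run from index i with open-slot state c, result flushed at the end
def pvBF (tokens markup : List String) (c : Option (String × Int)) (i : Nat) : List (String × String) :=
  pvFlush tokens (markup.length : Int)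
    (List.foldl (pvBStep tokens) ([], c) (PySem.List.enumerate (markup.drop i) (i : Int)))

theorem pvBStep_acc (tokens : List String) (p : Int × String)
    (acc : List (String × String)) (c : Option (String × Int)) :
    pvBStep tokens (acc, c) p
      = (acc ++ (pvBStep tokens ([], c) p).1, (pvBStep tokens ([], c) p).2) := by
  unfold pvBStep
  cases c with
  | none => split_ifs <;> simp
  | some d => by_cases h1 : p.2.toList = 'I' :: '-' :: d.1.toList <;> split_ifs <;> simp_all

theorem pvFoldl_acc (tokens : List String) (l : List (Int × String))
    (acc : List (String × String)) (c : Option (String × Int)) :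
    List.foldl (pvBStep tokens) (acc, c) l
      = (acc ++ (List.foldl (pvBStep tokens) ([], c) l).1,
         (List.foldl (pvBStep tokens) ([], c) l).2) := by
  induction l generalizing acc c with
  | nil => simp
  | cons p l ih =>
    simp only [List.foldl_cons]
    rw [pvBStep_acc tokens p acc c, ih, ih (pvBStep tokens ([], c) p).1]
    simp

theorem pvBF_stop (tokens markup : List String) (c : Option (String × Int)) :
    pvBF tokens markup c markup.length
      = pvFlush tokens (markup.length : Int) ([], c) := by
  unfold pvBF
  simp [PySem.List.enumerate_nil]

theorem pvBF_cons (tokens markup : List String) (c : Option (String × Int)) (i : Nat)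
    (h : i < markup.length) :
    pvBF tokens markup c i
      = (pvBStep tokens ([], c) ((i : Int), markup[i])).1
        ++ pvBF tokens markup (pvBStep tokens ([], c) ((i : Int), markup[i])).2 (i + 1) := by
  unfold pvBF
  rw [List.drop_eq_getElem_cons h, PySem.List.enumerate_cons, List.foldl_cons]
  have hc : (i : Int) + 1 = ((i + 1 : Nat) : Int) := by push_cast; ring
  rw [hc]
  rcases hs : pvBStep tokens ([], c) ((i : Int), markup[i]) with ⟨a1, c1⟩
  rw [pvFoldl_acc tokens _ a1 c1]
  unfold pvFlush
  rcases (List.foldl (pvBStep tokens) ([], c1) (PySem.List.enumerate (markup.drop (i+1)) ((i+1 : Nat) : Int))).2 with _ | d <;> simp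

theorem pvGetSentinel (markup : List String) (i : Nat) (h : i < markup.length) :
    PySem.List.pyGet? (markup ++ ["O"]) (i : Int) = some markup[i] := by
  simp [PySem.List.pyGet?_natCast, List.getElem?_append_left h]

theorem pvGetNone (markup : List String) (e : Nat) (h : markup.length + 1 ≤ e) :
    PySem.List.pyGet? (markup ++ ["O"]) (e : Int) = none := by
  simp [PySem.List.pyGet?_natCast]
  omega

theorem pvGetO (markup : List String) :
    PySem.List.pyGet? (markup ++ ["O"]) ((markup.length : Nat) : Int) = some "O" := by
  simp

theorem pvScanEnd_ge (m : List String) (cont : List Char) :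
    ∀ (fuel e : Nat), e ≤ pvScanEnd m cont fuel e := by
  intro fuel
  induction fuel with
  | zero => intro e; simp [pvScanEnd]
  | succ f ih =>
    intro e
    simp only [pvScanEnd]
    cases PySem.List.pyGet? m (e : Int) with
    | none => exact le_refl e
    | some tag =>
      show e ≤ if tag.toList = cont then pvScanEnd m cont f (e + 1) else e
      by_cases h : tag.toList = cont
      · rw [if_pos h]; have := ih (e + 1); omega
      · rw [if_neg h]

theorem pvScanEnd_irrel (markup : List String) (cont : List Char) :
    ∀ (f1 f2 e : Nat), markup.length + 1 ≤ e + f1 → markup.length + 1 ≤ e + f2 →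
      pvScanEnd (markup ++ ["O"]) cont f1 e = pvScanEnd (markup ++ ["O"]) cont f2 e := by
  intro f1
  induction f1 with
  | zero =>
    intro f2 e h1 h2
    cases f2 with
    | zero => rfl
    | succ f2 =>
      simp only [pvScanEnd]
      rw [pvGetNone markup e (by omega)]
  | succ f1 ih =>
    intro f2 e h1 h2
    cases f2 with
    | zero =>
      simp only [pvScanEnd]
      rw [pvGetNone markup e (by omega)]
    | succ f2 =>
      simp only [pvScanEnd]
      cases hg : PySem.List.pyGet? (markup ++ ["O"]) (e : Int) with
      | none => rfl
      | some tag =>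
        show (if tag.toList = cont then pvScanEnd (markup ++ ["O"]) cont f1 (e + 1) else e)
          = if tag.toList = cont then pvScanEnd (markup ++ ["O"]) cont f2 (e + 1) else e
        by_cases h : tag.toList = cont
        · rw [if_pos h, if_pos h]
          exact ih f2 (e + 1) (by omega) (by omega)
        · rw [if_neg h, if_neg h]

theorem pvScanF_step (markup : List String) (cont : List Char) (e : Nat)
    (h : e < markup.length) :
    pvScanEnd (markup ++ ["O"]) cont (markup.length + 1) e
      = if (markup[e]'h).toList = cont
        then pvScanEnd (markup ++ ["O"]) cont (markup.length + 1) (e + 1) else e := by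
  conv_lhs => rw [pvScanEnd]
  rw [pvGetSentinel markup e h]
  show (if (markup[e]'h).toList = cont
        then pvScanEnd (markup ++ ["O"]) cont markup.length (e + 1) else e) = _
  by_cases hc : (markup[e]'h).toList = cont
  · rw [if_pos hc, if_pos hc]
    exact pvScanEnd_irrel markup cont markup.length (markup.length + 1) (e + 1) (by omega) (by omega)
  · rw [if_neg hc, if_neg hc]

theorem pvScanF_stop (markup : List String) (cont : List Char) (hc : cont ≠ ['O']) :
    pvScanEnd (markup ++ ["O"]) cont (markup.length + 1) markup.length = markup.length := by
  conv_lhs => rw [pvScanEnd]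
  rw [pvGetO markup]
  show (if ("O" : String).toList = cont
        then pvScanEnd (markup ++ ["O"]) cont markup.length (markup.length + 1)
        else markup.length) = _
  rw [if_neg (fun h => hc (by simpa using h.symm))]

theorem pvScanF_le (markup : List String) (cont : List Char) (hc : cont ≠ ['O']) :
    ∀ (n e : Nat), e ≤ markup.length → markup.length - e = n →
      pvScanEnd (markup ++ ["O"]) cont (markup.length + 1) e ≤ markup.length := by
  intro n
  induction n using Nat.strong_induction_on with
  | _ n ih =>
    intro e he hn
    rcases Nat.lt_or_ge e markup.length with hlt | hge
    · rw [pvScanF_step markup cont e hlt]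
      by_cases h : (markup[e]'hlt).toList = cont
      · rw [if_pos h]
        exact ih (markup.length - (e + 1)) (by omega) (e + 1) (by omega) rfl
      · rw [if_neg h]; omega
    · have : e = markup.length := by omega
      subst this
      rw [pvScanF_stop markup cont hc]

theorem pvContNe (slot : String) : 'I' :: '-' :: slot.toList ≠ ['O'] := by
  intro h; cases h

theorem pvALoop_stop (tokens m : List String) (f j : Nat) (acc : List (String × String))
    (h : m.length ≤ j) : pvALoop tokens m f j acc = acc := by
  cases f with
  | zero => rfl
  | succ f => simp only [pvALoop]; rw [dif_neg (by omega)]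

-- B-side invariant: running B from index i with an open slot first closes it at the
-- scan end of A's inner while, then continues closed from there
theorem pvOpen (tokens markup : List String) :
    ∀ n i, i ≤ markup.length → markup.length - i = n →
      ∀ (slot : String) (start : Int),
        pvBF tokens markup (some (slot, start)) i
          = (slot, pvJ tokens start ((pvScanEnd (markup ++ ["O"]) ('I' :: '-' :: slot.toList) (markup.length + 1) i : Nat) : Int))
            :: pvBF tokens markup none (pvScanEnd (markup ++ ["O"]) ('I' :: '-' :: slot.toList) (markup.length + 1) i) := by
  intro n
  induction n using Nat.strong_induction_on with
  | _ n ih =>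
    intro i hi hn slot start
    rcases Nat.lt_or_ge i markup.length with hlt | hge
    · rw [pvBF_cons tokens markup (some (slot, start)) i hlt]
      by_cases hcont : (markup[i]'hlt).toList = 'I' :: '-' :: slot.toList
      · have hstep : pvBStep tokens ([], some (slot, start)) ((i : Int), markup[i]'hlt)
            = ([], some (slot, start)) := by
          simp [pvBStep, hcont]
        rw [hstep]
        rw [ih (markup.length - (i + 1)) (by omega) (i + 1) (by omega) rfl slot start]
        rw [pvScanF_step markup _ i hlt, if_pos hcont]
        simp
      · rw [pvScanF_step markup _ i hlt, if_neg hcont]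
        by_cases hO : (markup[i]'hlt).toList = ['O']
        · have hstep : pvBStep tokens ([], some (slot, start)) ((i : Int), markup[i]'hlt)
              = ([(slot, pvJ tokens start (i : Int))], none) := by
            simp [pvBStep, hO]
          rw [hstep]
          rw [pvBF_cons tokens markup none i hlt]
          have hstepN : pvBStep tokens ([], none) ((i : Int), markup[i]'hlt)
              = ([], none) := by
            simp [pvBStep, hO]
          rw [hstepN]
          simp
        · have hstep : pvBStep tokens ([], some (slot, start)) ((i : Int), markup[i]'hlt)
              = ([(slot, pvJ tokens start (i : Int))],
                 some (PySem.Str.slice (markup[i]'hlt) (some 2) none, (i : Int))) := by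
            simp [pvBStep, hcont, hO]
          rw [hstep]
          rw [pvBF_cons tokens markup none i hlt]
          have hstepN : pvBStep tokens ([], none) ((i : Int), markup[i]'hlt)
              = ([], some (PySem.Str.slice (markup[i]'hlt) (some 2) none, (i : Int))) := by
            simp [pvBStep, hO]
          rw [hstepN]
          simp
    · have hlen : i = markup.length := by omega
      subst hlen
      rw [pvScanF_stop markup _ (pvContNe slot)]
      rw [pvBF_stop, pvBF_stop]
      simp [pvFlush]

-- the main invariant: with enough fuel, A's outer loop from index i equals B's closed run
theorem pvClosed (tokens markup : List String) :
    ∀ (fuel : Nat), ∀ i, i ≤ markup.length → markup.length + 1 ≤ i + fuel →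
      ∀ acc, pvALoop tokens (markup ++ ["O"]) fuel i acc = acc ++ pvBF tokens markup none i := by
  intro fuel
  induction fuel with
  | zero => intro i hi hf; omega
  | succ f ih =>
    intro i hi hf acc
    rcases Nat.lt_or_ge i markup.length with hlt | hge
    · have hm : i < (markup ++ ["O"]).length := by simp; omega
      simp only [pvALoop]
      rw [dif_pos hm]
      have htag : (markup ++ ["O"])[i]'hm = markup[i]'hlt := by
        exact List.getElem_append_left ..
      simp only [htag]
      by_cases hO : (markup[i]'hlt).toList = ['O']
      · rw [if_neg (by simpa using hO)]
        rw [ih (i + 1) (by omega) (by omega) acc]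
        rw [pvBF_cons tokens markup none i hlt]
        simp [pvBStep, hO]
      · rw [if_pos (by simpa using hO)]
        set slot := PySem.Str.slice (markup[i]'hlt) (some 2) none with hslot
        have hmlen : (markup ++ ["O"]).length = markup.length + 1 := by simp
        rw [hmlen]
        set e := pvScanEnd (markup ++ ["O"]) ('I' :: '-' :: slot.toList) (markup.length + 1) (i + 1) with he
        have he1 : i + 1 ≤ e := pvScanEnd_ge _ _ _ _
        have he2 : e ≤ markup.length :=
          pvScanF_le markup _ (pvContNe slot) (markup.length - (i + 1)) (i + 1) (by omega) rfl
        rw [ih e he2 (by omega)]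
        rw [pvBF_cons tokens markup none i hlt]
        have hstep : pvBStep tokens ([], none) ((i : Int), markup[i]'hlt)
            = ([], some (slot, (i : Int))) := by
          rw [hslot]; simp [pvBStep, hO]
        rw [hstep]
        rw [pvOpen tokens markup (markup.length - (i + 1)) (i + 1) (by omega) rfl slot (i : Int)]
        simp [← he]
    · have hlen : i = markup.length := by omega
      subst hlen
      simp only [pvALoop]
      have hm : markup.length < (markup ++ ["O"]).length := by simp
      rw [dif_pos hm]
      have htag : (markup ++ ["O"])[markup.length]'hm = "O" := List.getElem_concat_length rfl hm
      simp only [htag]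
      rw [if_neg (by simp)]
      rw [pvALoop_stop tokens (markup ++ ["O"]) f (markup.length + 1) acc (by simp)]
      rw [pvBF_stop]
      simp [pvFlush]

-- ===== VERDICT (by name: the statement is the Claim_ definition above) =====
theorem biomarkup2list_py_spec : Claim_equal_biomarkup2list_py := by
  intro tokens markup _
  unfold Spec_biomarkup2list_py biomarkup2list_py biomarkup2list_py_alt
  have h := pvClosed tokens markup ((markup ++ ["O"]).length + 1) 0 (by omega) (by simp) []
  rw [h]
  unfold pvBF
  simp
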